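-- pv_equiv track=rewrite | github.com/youngmd/pangrams | pangrams.py | score_set
-- ===== SOURCE A (Python) =====
-- def isPangram(cl, word):
--     for c in cl:
--         if c not in word:
--             return False
--     return True
--
-- def score_set(cl, wl):
--     best_score = 0
--     best_center = ''
--     best_list = []
--     for c in cl:
--         cscore = 0
--         pangram_cnt = 0
--         word_list = []
--         for w in wl:
--             if c not in w:
--                 continue
--             word_list.append(w)
--             wscore = len(w)
--             if wscore > 6 and isPangram(cl, w):
--                 wscore += 7
--                 pangram_cnt += 1
--             cscore += wscore
--
--         if cscore > best_score and pangram_cnt: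
--             best_score = cscore
--             best_center = c
--             best_list = word_list
--     return (best_center, best_score, pangram_cnt, best_list)
-- ===== SOURCE B (Python) =====
-- def score_set(cl, wl):
--     # One pass over the words: each word distributes its score to the accumulator
--     # of every center letter it contains (a dict indexed by letter), with the
--     # pangram test done once per word via a set-subset check.  A second short
--     # pass over the per-letter accumulators picks the winning center.
--     stats = {c: [0, 0, []] for c in cl}
--     need = set(cl)
--     for w in wl:
--         chars = set(w)
--         bonus = len(w) > 6 and need <= chars
--         ws = len(w) + 7 * bonus
--         for c, st in stats.items():
--             if c in chars:
--                 st[0] += ws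
--                 st[1] += bonus
--                 st[2].append(w)
--     best = ('', 0, 0, [])
--     for c, (sc, pc, lst) in stats.items():
--         if pc and sc > best[1]:
--             best = (c, sc, pc, lst)
--     return best
-- ===== Notes on version B (the rewrite author's own statement) =====
-- stated objective: faster
-- what changed: B inverts the loop nest: one pass over the words, each word distributing its score (pangram tested once per word by a set-subset check) into a dict of per-letter accumulators, then a short scan of that dict picks the winning center; A instead rescans the whole word list per center and re-runs the per-character pangram test for every center/word pair. Pre_ excludes only cl='' where A raises NameError.
import Mathlib
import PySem

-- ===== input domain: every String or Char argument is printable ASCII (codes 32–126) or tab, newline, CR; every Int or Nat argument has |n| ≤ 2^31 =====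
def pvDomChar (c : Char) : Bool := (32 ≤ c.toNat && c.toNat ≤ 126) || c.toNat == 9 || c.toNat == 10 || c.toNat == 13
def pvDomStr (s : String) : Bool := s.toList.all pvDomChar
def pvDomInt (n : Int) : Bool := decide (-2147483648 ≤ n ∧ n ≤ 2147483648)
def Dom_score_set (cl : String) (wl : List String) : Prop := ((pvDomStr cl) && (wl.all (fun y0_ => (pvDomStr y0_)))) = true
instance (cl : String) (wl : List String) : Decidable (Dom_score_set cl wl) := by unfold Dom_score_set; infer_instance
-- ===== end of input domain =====

-- B inverts the loop nest: one pass over the words distributes each word's score into a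
-- dict of per-center accumulators (pangram tested once per word), then a scan of the dict
-- picks the winning center; return values agree with A on Pre_ (cl nonempty).

-- ===== PORT A =====
-- `c in word` on a 1-char string is char membership in the word's characters.
def isPangram (cl word : String) : Bool :=
  cl.toList.all (fun c => c ∈ word.toList)

def score_set (cl : String) (wl : List String) : String × Int × Int × List String :=
  -- state: (best_score, best_center, best_list, pangram_cnt); pangram_cnt is reset each
  -- outer iteration and leaks out of the loop exactly as in Python (Pre_ gives cl ≠ "").
  let res := cl.toList.foldl
    (fun (st : Int × String × List String × Int) c =>
      let inner := wl.foldl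
        (fun (acc : Int × Int × List String) w =>
          if c ∈ w.toList then
            let wscore : Int := PySem.Str.len w
            let (wscore, pcnt) :=
              if wscore > 6 && isPangram cl w then (wscore + 7, acc.2.1 + 1)
              else (wscore, acc.2.1)
            (acc.1 + wscore, pcnt, acc.2.2 ++ [w])
          else acc)
        (0, 0, [])
      if inner.1 > st.1 && inner.2.1 != 0 then (inner.1, String.ofList [c], inner.2.2, inner.2.1)
      else (st.1, st.2.1, st.2.2.1, inner.2.1))
    (0, "", [], 0)
  (res.2.1, res.1, res.2.2.2, res.2.2.1)

-- ===== PORT B =====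
def score_set_alt (cl : String) (wl : List String) : String × Int × Int × List String :=
  -- stats = {c: [0, 0, []] for c in cl}
  let stats0 : PySem.Dict Char (Int × Int × List String) :=
    cl.toList.foldl (fun d c => d.insert c (0, 0, [])) PySem.Dict.empty
  let need : PySem.Set Char := PySem.Set.ofList cl.toList
  -- one pass over the words, updating each selected entry of stats in place
  let stats := wl.foldl
    (fun (stats : PySem.Dict Char (Int × Int × List String)) w =>
      let chars : PySem.Set Char := PySem.Set.ofList w.toList
      let bonus := PySem.Str.len w > 6 && PySem.Set.issubset need chars
      let ws : Int := PySem.Str.len w + 7 * (if bonus then 1 else 0)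
      PySem.Dict.mk (stats.items.map (fun p =>
        if chars.contains p.1 then
          (p.1, (p.2.1 + ws, p.2.2.1 + (if bonus then 1 else 0), p.2.2.2 ++ [w]))
        else p)))
    stats0
  -- best-center scan over the dict items
  stats.items.foldl
    (fun (best : String × Int × Int × List String) p =>
      if p.2.2.1 != 0 && p.2.1 > best.2.1 then (String.ofList [p.1], p.2.1, p.2.2.1, p.2.2.2)
      else best)
    ("", 0, 0, [])

-- ===== PRECONDITION & SPEC =====
-- On cl = "" Python A raises NameError (pangram_cnt is never bound); excluded.
def Pre_score_set (cl : String) (wl : List String) : Prop := cl ≠ ""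
instance (cl : String) (wl : List String) : Decidable (Pre_score_set cl wl) := by unfold Pre_score_set; infer_instance
def pvWitness_score_set : String × List String := ("abcdefg", ["bandage", "cabbage"])

def Spec_score_set (cl : String) (wl : List String) (out : String × Int × Int × List String) : Prop := out = score_set_alt cl wl
instance (cl : String) (wl : List String) (out : String × Int × Int × List String) : Decidable (Spec_score_set cl wl out) := by unfold Spec_score_set; infer_instance

-- ===== CLAIM (what is proved, stated in full; the proofs are below) =====
def Claim_equal_score_set : Prop := ∀ (cl : String) (wl : List String), Dom_score_set cl wl → Pre_score_set cl wl → Spec_score_set cl wl (score_set cl wl)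

-- ===== LEMMAS AND PROOFS =====

-- the pangram-bonus test and the per-word score, as both programs compute them
def pvG (cl w : String) : Bool := PySem.Str.len w > 6 && isPangram cl w
def pvW (cl w : String) : Int := if pvG cl w then PySem.Str.len w + 7 else PySem.Str.len w

-- the per-center triple both programs compute: (score, pangram count, selected words)
def pvCenter (cl : String) (wl : List String) (c : Char) : Int × Int × List String :=
  (((wl.filter (fun w => c ∈ w.toList)).map (pvW cl)).sum,
   ((wl.filter (fun w => c ∈ w.toList)).countP (pvG cl) : Int),
   wl.filter (fun w => c ∈ w.toList))

theorem pvCenter_nil (cl : String) (c : Char) : pvCenter cl [] c = (0, 0, []) := rfl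

theorem pvCenter_cons (cl : String) (w : String) (t : List String) (c : Char) :
    pvCenter cl (w :: t) c =
      if c ∈ w.toList then
        (pvW cl w + (pvCenter cl t c).1,
         (if pvG cl w then 1 else 0) + (pvCenter cl t c).2.1,
         w :: (pvCenter cl t c).2.2)
      else pvCenter cl t c := by
  by_cases hm : c ∈ w.toList
  · by_cases hG : pvG cl w = true <;>
      simp [pvCenter, pvW, hm, hG, List.countP_cons] <;> push_cast <;> try omega
  · simp [pvCenter, hm]

theorem pvCenter_snoc (cl : String) (acc : List String) (w : String) (c : Char) :
    pvCenter cl (acc ++ [w]) c =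
      if c ∈ w.toList then
        ((pvCenter cl acc c).1 + pvW cl w,
         (pvCenter cl acc c).2.1 + (if pvG cl w then 1 else 0),
         (pvCenter cl acc c).2.2 ++ [w])
      else pvCenter cl acc c := by
  by_cases hm : c ∈ w.toList
  · by_cases hG : pvG cl w = true <;>
      simp [pvCenter, hm, hG, pvW, List.filter_append, List.countP_append] <;> push_cast <;> omega
  · simp [pvCenter, hm, List.filter_append]

-- every pangram word contains every center letter, so the pangram count per center is constant
theorem pvCenter_pc_const (cl : String) (wl : List String) (c : Char) (hc : c ∈ cl.toList) :
    (pvCenter cl wl c).2.1 = (wl.countP (pvG cl) : Int) := by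
  have h : (wl.filter (fun w => c ∈ w.toList)).countP (pvG cl) = wl.countP (pvG cl) := by
    rw [List.countP_filter]
    apply List.countP_congr
    intro w _
    by_cases hG : pvG cl w = true
    · have hmem : c ∈ w.toList := by
        have := (List.all_eq_true.mp ((Bool.and_eq_true _ _).mp hG).2) c hc
        simpa using this
      simp [hG, hmem]
    · simp [Bool.eq_false_iff.mpr hG]
  simp [pvCenter, h]

-- a center's score is positive as soon as one pangram word exists
theorem pvCenter_score_pos (cl : String) (wl : List String) (c : Char) (hc : c ∈ cl.toList)
    (hP : wl.countP (pvG cl) ≠ 0) : 0 < (pvCenter cl wl c).1 := by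
  have hex : ∃ w ∈ wl, pvG cl w = true := by
    by_contra hno
    push_neg at hno
    exact hP (List.countP_eq_zero.mpr (by intro w hw; simp [hno w hw]))
  obtain ⟨w, hw, hG⟩ := hex
  have hmem : c ∈ w.toList := by
    have := (List.all_eq_true.mp ((Bool.and_eq_true _ _).mp hG).2) c hc
    simpa using this
  have hwf : w ∈ wl.filter (fun w => c ∈ w.toList) := List.mem_filter.mpr ⟨hw, by simpa using hmem⟩
  have hin : pvW cl w ∈ (wl.filter (fun w => c ∈ w.toList)).map (pvW cl) :=
    List.mem_map.mpr ⟨w, hwf, rfl⟩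
  have hnn : ∀ x ∈ (wl.filter (fun w => c ∈ w.toList)).map (pvW cl), (0:Int) ≤ x := by
    intro x hx
    obtain ⟨u, _, rfl⟩ := List.mem_map.mp hx
    have : (0:Int) ≤ PySem.Str.len u := by rw [PySem.Str.len_eq]; positivity
    unfold pvW; split <;> omega
  have hle := List.single_le_sum hnn _ hin
  have hpos : (0:Int) < pvW cl w := by
    have hlen : (0:Int) ≤ PySem.Str.len w := by rw [PySem.Str.len_eq]; positivity
    unfold pvW
    simp only [hG, if_true]
    omega
  calc (0:Int) < pvW cl w := hpos
    _ ≤ _ := hle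

-- A's inner step, written without the destructuring match
theorem stepA_eq (cl : String) (c : Char) (acc : Int × Int × List String) (w : String) :
    (if c ∈ w.toList then
        (let wscore : Int := PySem.Str.len w
         let (wscore, pcnt) :=
           if wscore > 6 && isPangram cl w then (wscore + 7, acc.2.1 + 1)
           else (wscore, acc.2.1)
         ((acc.1 + wscore, pcnt, acc.2.2 ++ [w]) : Int × Int × List String))
      else acc)
    = (if c ∈ w.toList then
        (acc.1 + pvW cl w, (if pvG cl w then acc.2.1 + 1 else acc.2.1), acc.2.2 ++ [w])
       else acc) := by
  by_cases hm : c ∈ w.toList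
  · simp [hm, pvW, pvG]
    constructor <;> split <;> rfl
  · simp [hm]

-- A's inner word loop computes pvCenter (up to the running accumulators)
theorem innerA_eq (cl : String) (c : Char) (wl : List String) :
    ∀ (cs pc : Int) (ws : List String),
    wl.foldl
      (fun (acc : Int × Int × List String) w =>
        if c ∈ w.toList then
          (acc.1 + pvW cl w, (if pvG cl w then acc.2.1 + 1 else acc.2.1), acc.2.2 ++ [w])
        else acc)
      (cs, pc, ws)
    = (cs + (pvCenter cl wl c).1, pc + (pvCenter cl wl c).2.1, ws ++ (pvCenter cl wl c).2.2) := by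
  induction wl with
  | nil => intro cs pc ws; simp [pvCenter]
  | cons w t ih =>
    intro cs pc ws
    simp only [List.foldl_cons, pvCenter_cons]
    by_cases hm : c ∈ w.toList
    · simp only [if_pos hm, ih]
      by_cases hG : pvG cl w = true <;> simp [hG] <;> push_cast <;> try omega
    · simp [hm, ih]

-- the two selection folds (A's state order and B's state order)
def pvSel3 (f : Char → Int × Int × List String) (l : List Char) (st : Int × String × List String) :
    Int × String × List String :=
  l.foldl
    (fun st c =>
      if (f c).1 > st.1 && (f c).2.1 != 0 then ((f c).1, String.ofList [c], (f c).2.2) else st)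
    st

def pvSel4 (f : Char → Int × Int × List String) (l : List Char) (st : String × Int × Int × List String) :
    String × Int × Int × List String :=
  l.foldl
    (fun st c =>
      if (f c).2.1 != 0 && (f c).1 > st.2.1 then (String.ofList [c], (f c).1, (f c).2.1, (f c).2.2)
      else st)
    st

-- A's 4-state best fold vs the 3-state fold plus the leaked last pangram count
theorem outer_eq (f : Char → Int × Int × List String) :
    ∀ (l : List Char) (bs : Int) (bc : String) (bl : List String) (pc : Int),
    l.foldl
      (fun (st : Int × String × List String × Int) c =>
        if (f c).1 > st.1 && (f c).2.1 != 0 then ((f c).1, String.ofList [c], (f c).2.2, (f c).2.1)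
        else (st.1, st.2.1, st.2.2.1, (f c).2.1))
      (bs, bc, bl, pc)
    = (let r := pvSel3 f l (bs, bc, bl)
       (r.1, r.2.1, r.2.2, match l.getLast? with | none => pc | some c => (f c).2.1)) := by
  intro l
  induction l with
  | nil => intro bs bc bl pc; rfl
  | cons c t ih =>
    intro bs bc bl pc
    simp only [List.foldl_cons, pvSel3] at *
    by_cases h : ((f c).1 > bs && (f c).2.1 != 0) = true
    · simp only [h, if_pos h, ih]
      cases t with
      | nil => simp
      | cons d t' =>
        have hx : (d :: t').getLast? = some ((d :: t').getLast (by simp)) :=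
          List.getLast?_eq_some_getLast (by simp)
        simp [hx]
    · simp only [if_neg h, ih]
      cases t with
      | nil => simp
      | cons d t' =>
        have hx : (d :: t').getLast? = some ((d :: t').getLast (by simp)) :=
          List.getLast?_eq_some_getLast (by simp)
        simp [hx]

-- the two selection folds agree on the center / score / word-list components
theorem sel4_eq_sel3 (f : Char → Int × Int × List String) :
    ∀ (l : List Char) (bs : Int) (bc : String) (bl : List String) (q : Int),
      (pvSel4 f l (bc, bs, q, bl)).1 = (pvSel3 f l (bs, bc, bl)).2.1 ∧
      (pvSel4 f l (bc, bs, q, bl)).2.1 = (pvSel3 f l (bs, bc, bl)).1 ∧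
      (pvSel4 f l (bc, bs, q, bl)).2.2.2 = (pvSel3 f l (bs, bc, bl)).2.2 := by
  intro l
  induction l with
  | nil => intro bs bc bl q; exact ⟨rfl, rfl, rfl⟩
  | cons c t ih =>
    intro bs bc bl q
    have hcomm : ((f c).2.1 != 0 && decide ((f c).1 > bs)) = (decide ((f c).1 > bs) && (f c).2.1 != 0) :=
      Bool.and_comm _ _
    simp only [pvSel4, pvSel3, List.foldl_cons] at *
    by_cases h : (decide ((f c).1 > bs) && (f c).2.1 != 0) = true
    · rw [hcomm]
      simp only [h, if_pos h]
      exact ih (f c).1 (String.ofList [c]) (f c).2.2 (f c).2.1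
    · rw [hcomm]
      simp only [h, if_neg h]
      exact ih bs bc bl q

-- one selection step never decreases the running best score
theorem sel4_step_mono (f : Char → Int × Int × List String) (st : String × Int × Int × List String) (c : Char) :
    st.2.1 ≤ (if (f c).2.1 != 0 && (f c).1 > st.2.1 then (String.ofList [c], (f c).1, (f c).2.1, (f c).2.2) else st).2.1 := by
  split
  · rename_i h
    have h2 := ((Bool.and_eq_true _ _).mp h).2
    simp only [decide_eq_true_eq] at h2
    show st.2.1 ≤ (f c).1
    omega
  · exact le_refl _

-- the condition stays false as the best score grows
theorem cond_antitone (f : Char → Int × Int × List String) (c : Char) (s s' : Int) (hle : s ≤ s')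
    (h : ((f c).2.1 != 0 && (f c).1 > s) = false) : ((f c).2.1 != 0 && (f c).1 > s') = false := by
  rcases (Bool.and_eq_false_iff.mp h) with h1 | h1
  · simp [h1]
  · simp only [Bool.and_eq_false_iff]
    right
    simp at h1 ⊢
    omega

-- first-occurrence subsequence of l relative to the already-seen letters ks
def pvFresh (ks : List Char) : List Char → List Char
  | [] => []
  | c :: t => if c ∈ ks then pvFresh ks t else c :: pvFresh (ks ++ [c]) t

-- duplicates after their first occurrence are no-ops for the selection fold
theorem sel4_fresh (f : Char → Int × Int × List String) :
    ∀ (l : List Char) (st : String × Int × Int × List String) (ks : List Char),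
      (∀ c ∈ ks, ((f c).2.1 != 0 && (f c).1 > st.2.1) = false) →
      pvSel4 f l st = pvSel4 f (pvFresh ks l) st := by
  intro l
  induction l with
  | nil => intro st ks _; rfl
  | cons c t ih =>
    intro st ks hks
    by_cases hc : c ∈ ks
    · have h0 : ((f c).2.1 != 0 && (f c).1 > st.2.1) = false := hks c hc
      simp only [pvSel4, List.foldl_cons, pvFresh, if_pos hc, h0] at *
      simp only [Bool.false_eq_true, if_false]
      exact ih st ks hks
    · simp only [pvFresh, if_neg hc]
      simp only [pvSel4, List.foldl_cons] at *
      set st' := (if (f c).2.1 != 0 && (f c).1 > st.2.1 then (String.ofList [c], (f c).1, (f c).2.1, (f c).2.2) else st) with hst'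
      have hmono : st.2.1 ≤ st'.2.1 := sel4_step_mono f st c
      apply ih st' (ks ++ [c])
      intro d hd
      rcases List.mem_append.mp hd with hd | hd
      · exact cond_antitone f d _ _ hmono (hks d hd)
      · have hdc : d = c := by simpa using hd
        subst hdc
        by_cases hfire : ((f d).2.1 != 0 && (f d).1 > st.2.1) = true
        · have : st'.2.1 = (f d).1 := by rw [hst', if_pos hfire]
          simp only [Bool.and_eq_false_iff]
          right
          simp [this]
        · have h0 : ((f d).2.1 != 0 && (f d).1 > st.2.1) = false := Bool.eq_false_iff.mpr hfire
          exact cond_antitone f d _ _ hmono h0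

-- if no center has a pangram the selection fold never fires
theorem sel4_id (f : Char → Int × Int × List String) :
    ∀ (l : List Char) (st : String × Int × Int × List String),
      (∀ c ∈ l, (f c).2.1 = 0) → pvSel4 f l st = st := by
  intro l
  induction l with
  | nil => intro st _; rfl
  | cons c t ih =>
    intro st h
    have h0 : (f c).2.1 = 0 := h c (List.mem_cons_self)
    simp only [pvSel4, List.foldl_cons, h0] at *
    simp only [bne_self_eq_false, Bool.false_and, Bool.false_eq_true, if_false]
    exact ih st (fun d hd => h d (List.mem_cons_of_mem _ hd))

-- once the carried pangram count equals the constant P it stays P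
theorem sel4_pc_inv (f : Char → Int × Int × List String) (P : Int) :
    ∀ (l : List Char) (st : String × Int × Int × List String),
      (∀ c ∈ l, (f c).2.1 = P) → st.2.2.1 = P → (pvSel4 f l st).2.2.1 = P := by
  intro l
  induction l with
  | nil => intro st _ h; exact h
  | cons c t ih =>
    intro st h hst
    simp only [pvSel4, List.foldl_cons] at *
    refine ih _ (fun d hd => h d (List.mem_cons_of_mem _ hd)) ?_
    by_cases hf : ((f c).2.1 != 0 && (f c).1 > st.2.1) = true
    · simp only [if_pos hf]
      exact h c List.mem_cons_self
    · simp only [if_neg hf]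
      exact hst

-- B's subset test is A's isPangram
theorem issubset_eq_isPangram (cl w : String) :
    PySem.Set.issubset (PySem.Set.ofList cl.toList) (PySem.Set.ofList w.toList) = isPangram cl w := by
  rw [Bool.eq_iff_iff]
  simp only [PySem.Set.issubset, PySem.Set.contains, isPangram, List.all_eq_true,
    List.contains_iff_mem, PySem.Set.mem_ofList, decide_eq_true_eq]

-- dict membership test over ofList
theorem set_contains_eq (w : String) (c : Char) :
    PySem.Set.contains (PySem.Set.ofList w.toList) c = decide (c ∈ w.toList) := by
  rw [Bool.eq_iff_iff]
  simp [PySem.Set.contains, List.contains_iff_mem, PySem.Set.mem_ofList]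

-- building the stats dict with a constant value appends first occurrences
theorem dict_fold_const {ν : Type} (v : ν) :
    ∀ (l ks : List Char),
      l.foldl (fun (d : PySem.Dict Char ν) c => d.insert c v)
        (PySem.Dict.mk (ks.map (fun c => (c, v))))
      = PySem.Dict.mk ((ks ++ pvFresh ks l).map (fun c => (c, v))) := by
  intro l
  induction l with
  | nil => intro ks; simp [pvFresh]
  | cons c t ih =>
    intro ks
    have hcont : (PySem.Dict.mk (ks.map (fun c => (c, v)))).contains c = decide (c ∈ ks) := by
      rw [Bool.eq_iff_iff]
      simp [PySem.Dict.contains, List.any_map, Function.comp_def, List.any_eq_true]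
    by_cases hc : c ∈ ks
    · have hct : (PySem.Dict.mk (ks.map (fun c => (c, v)))).contains c = true := by simp [hcont, hc]
      have hins : (PySem.Dict.mk (ks.map (fun c => (c, v)))).insert c v
          = PySem.Dict.mk (ks.map (fun c => (c, v))) := by
        apply PySem.Dict.ext
        rw [PySem.Dict.items_insert_of_contains _ _ hct]
        simp only [PySem.Dict.items]
        rw [List.map_map]
        apply List.map_congr_left
        intro x _
        by_cases hx : x = c
        · subst hx; simp
        · simp [Function.comp_def, hx]
      simp only [List.foldl_cons, hins, ih ks, pvFresh, if_pos hc]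
    · have hct : (PySem.Dict.mk (ks.map (fun c => (c, v)))).contains c = false := by simp [hcont, hc]
      have hins : (PySem.Dict.mk (ks.map (fun c => (c, v)))).insert c v
          = PySem.Dict.mk ((ks ++ [c]).map (fun c => (c, v))) := by
        apply PySem.Dict.ext
        rw [PySem.Dict.items_insert_of_not_contains _ _ hct]
        simp
      simp only [List.foldl_cons, hins, ih (ks ++ [c]), pvFresh, if_neg hc, List.append_assoc,
        List.singleton_append]

-- the word loop maintains stats as the map of pvCenter over the processed prefix
theorem stats_fold (cl : String) :
    ∀ (wl acc : List String) (ks : List Char),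
      wl.foldl
        (fun (stats : PySem.Dict Char (Int × Int × List String)) w =>
          let chars : PySem.Set Char := PySem.Set.ofList w.toList
          let bonus := PySem.Str.len w > 6 && PySem.Set.issubset (PySem.Set.ofList cl.toList) chars
          let ws : Int := PySem.Str.len w + 7 * (if bonus then 1 else 0)
          PySem.Dict.mk (stats.items.map (fun p =>
            if chars.contains p.1 then
              (p.1, (p.2.1 + ws, p.2.2.1 + (if bonus then 1 else 0), p.2.2.2 ++ [w]))
            else p)))
        (PySem.Dict.mk (ks.map (fun c => (c, pvCenter cl acc c))))
      = PySem.Dict.mk (ks.map (fun c => (c, pvCenter cl (acc ++ wl) c))) := by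
  intro wl
  induction wl with
  | nil => intro acc ks; simp
  | cons w t ih =>
    intro acc ks
    simp only [List.foldl_cons]
    have hbonus : (PySem.Str.len w > 6 && PySem.Set.issubset (PySem.Set.ofList cl.toList)
        (PySem.Set.ofList w.toList)) = pvG cl w := by
      rw [issubset_eq_isPangram]; rfl
    have hstep : PySem.Dict.mk (((ks.map (fun c => (c, pvCenter cl acc c))).map (fun p =>
        if (PySem.Set.ofList w.toList).contains p.1 then
          (p.1, (p.2.1 + (PySem.Str.len w + 7 * (if pvG cl w then 1 else 0)),
                 p.2.2.1 + (if pvG cl w then 1 else 0), p.2.2.2 ++ [w]))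
        else p)))
        = PySem.Dict.mk (ks.map (fun c => (c, pvCenter cl (acc ++ [w]) c))) := by
      apply PySem.Dict.ext
      simp only [PySem.Dict.items, List.map_map]
      apply List.map_congr_left
      intro c _
      simp only [Function.comp_def, set_contains_eq]
      rw [pvCenter_snoc]
      by_cases hm : c ∈ w.toList
      · have hws : PySem.Str.len w + 7 * (if pvG cl w then 1 else 0) = pvW cl w := by
          unfold pvW; split <;> simp
        rw [hws]
        simp [hm]
      · simp [hm]
    simp only [hbonus, hstep]
    rw [ih (acc ++ [w]) ks]
    simp

theorem toList_ne_nil_of_ne_empty (s : String) (h : s ≠ "") : s.toList ≠ [] := by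
  intro hn
  apply h
  simpa using congrArg String.ofList hn

-- A's port, reduced to the canonical selection fold plus the leaked pangram count
theorem scoreA_eq (cl : String) (wl : List String) :
    score_set cl wl =
      (let r := pvSel3 (pvCenter cl wl) cl.toList (0, "", [])
       (r.2.1, r.1, (match cl.toList.getLast? with
          | none => (0:Int)
          | some c => (pvCenter cl wl c).2.1), r.2.2)) := by
  unfold score_set
  have hstep : ∀ c : Char,
      (fun (acc : Int × Int × List String) w =>
        if c ∈ w.toList then
          let wscore : Int := PySem.Str.len w
          let (wscore, pcnt) :=
            if wscore > 6 && isPangram cl w then (wscore + 7, acc.2.1 + 1)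
            else (wscore, acc.2.1)
          (acc.1 + wscore, pcnt, acc.2.2 ++ [w])
        else acc)
      = (fun (acc : Int × Int × List String) w =>
        if c ∈ w.toList then
          (acc.1 + pvW cl w, (if pvG cl w then acc.2.1 + 1 else acc.2.1), acc.2.2 ++ [w])
        else acc) := by
    intro c; funext acc w; exact stepA_eq cl c acc w
  have hA : ∀ (st : Int × String × List String × Int) (c : Char),
      (let inner := wl.foldl
        (fun (acc : Int × Int × List String) w =>
          if c ∈ w.toList then
            let wscore : Int := PySem.Str.len w
            let (wscore, pcnt) :=
              if wscore > 6 && isPangram cl w then (wscore + 7, acc.2.1 + 1)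
              else (wscore, acc.2.1)
            (acc.1 + wscore, pcnt, acc.2.2 ++ [w])
          else acc)
        (0, 0, [])
       if inner.1 > st.1 && inner.2.1 != 0 then (inner.1, String.ofList [c], inner.2.2, inner.2.1)
       else (st.1, st.2.1, st.2.2.1, inner.2.1))
      = (if (pvCenter cl wl c).1 > st.1 && (pvCenter cl wl c).2.1 != 0 then
          ((pvCenter cl wl c).1, String.ofList [c], (pvCenter cl wl c).2.2, (pvCenter cl wl c).2.1)
         else (st.1, st.2.1, st.2.2.1, (pvCenter cl wl c).2.1)) := by
    intro st c
    rw [hstep c, innerA_eq cl c wl 0 0 []]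
    simp
  simp only [hA, outer_eq (pvCenter cl wl)]

-- B's port, reduced to the canonical selection fold over the deduplicated centers
theorem scoreB_eq (cl : String) (wl : List String) :
    score_set_alt cl wl = pvSel4 (pvCenter cl wl) (pvFresh [] cl.toList) ("", 0, 0, []) := by
  simp only [score_set_alt]
  have h0 : cl.toList.foldl (fun (d : PySem.Dict Char (Int × Int × List String)) c => d.insert c (0, 0, [])) PySem.Dict.empty
      = PySem.Dict.mk ((pvFresh [] cl.toList).map (fun c => (c, (0, 0, [])))) := by
    have := dict_fold_const ((0:Int), (0:Int), ([]:List String)) cl.toList []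
    simpa using this
  rw [h0]
  have h1 : PySem.Dict.mk ((pvFresh [] cl.toList).map (fun c => (c, ((0:Int), (0:Int), ([]:List String)))))
      = PySem.Dict.mk ((pvFresh [] cl.toList).map (fun c => (c, pvCenter cl [] c))) := by
    apply PySem.Dict.ext
    simp [pvCenter_nil]
  rw [h1, stats_fold cl wl [] (pvFresh [] cl.toList)]
  simp only [List.nil_append, PySem.Dict.items]
  rw [List.foldl_map]
  rfl

-- ===== VERDICT (by name: the statement is the Claim_ definition above) =====
theorem score_set_spec : Claim_equal_score_set := by
  intro cl wl _ hpre
  unfold Spec_score_set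
  rw [scoreA_eq, scoreB_eq]
  have hne : cl.toList ≠ [] := toList_ne_nil_of_ne_empty cl hpre
  -- replace the fold over the deduplicated list by the fold over cl.toList
  rw [← sel4_fresh (pvCenter cl wl) cl.toList ("", 0, 0, []) [] (by intro c hc; simp at hc)]
  obtain ⟨h1, h2, h4⟩ := sel4_eq_sel3 (pvCenter cl wl) cl.toList 0 "" [] 0
  have hlast : cl.toList.getLast? = some (cl.toList.getLast hne) := List.getLast?_eq_some_getLast hne
  have hlmem : cl.toList.getLast hne ∈ cl.toList := List.getLast_mem hne
  -- the third component: both are the constant pangram count (or 0 when there is none)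
  have hpc : (match cl.toList.getLast? with
      | none => (0:Int)
      | some c => (pvCenter cl wl c).2.1)
      = (pvSel4 (pvCenter cl wl) cl.toList ("", 0, 0, [])).2.2.1 := by
    rw [hlast]
    by_cases hP : wl.countP (pvG cl) = 0
    · have hz : ∀ c ∈ cl.toList, (pvCenter cl wl c).2.1 = 0 := by
        intro c hc
        rw [pvCenter_pc_const cl wl c hc, hP]
        rfl
      rw [sel4_id (pvCenter cl wl) cl.toList _ hz]
      simp [hz _ hlmem]
    · obtain ⟨c₀, t, hct⟩ := List.exists_cons_of_ne_nil hne
      have hc₀ : c₀ ∈ cl.toList := by rw [hct]; exact List.mem_cons_self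
      have hPc : ∀ c ∈ cl.toList, (pvCenter cl wl c).2.1 = (wl.countP (pvG cl) : Int) :=
        fun c hc => pvCenter_pc_const cl wl c hc
      have hPne : ((wl.countP (pvG cl) : Int) ≠ 0) := by exact_mod_cast hP
      have hfire : ((pvCenter cl wl c₀).2.1 != 0 && (pvCenter cl wl c₀).1 > (("", 0, 0, []) : String × Int × Int × List String).2.1) = true := by
        have hpos := pvCenter_score_pos cl wl c₀ hc₀ hP
        simp only [Bool.and_eq_true, bne_iff_ne, ne_eq, decide_eq_true_eq]
        exact ⟨by rw [hPc c₀ hc₀]; exact hPne, by simpa using hpos⟩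
      show (pvCenter cl wl (cl.toList.getLast hne)).2.1 = _
      rw [hPc _ hlmem]
      rw [hct]
      simp only [pvSel4, List.foldl_cons, hfire, if_pos hfire]
      have : (pvSel4 (pvCenter cl wl) t ((String.ofList [c₀], (pvCenter cl wl c₀).1, (pvCenter cl wl c₀).2.1, (pvCenter cl wl c₀).2.2))).2.2.1 = (wl.countP (pvG cl) : Int) := by
        apply sel4_pc_inv
        · intro c hc; exact hPc c (by rw [hct]; exact List.mem_cons_of_mem _ hc)
        · simp [hPc c₀ hc₀]
      rw [← this]
      rfl
  simp only []
  rw [hpc]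
  have hx : pvSel4 (pvCenter cl wl) cl.toList ("", 0, 0, [])
      = ((pvSel4 (pvCenter cl wl) cl.toList ("", 0, 0, [])).1,
         (pvSel4 (pvCenter cl wl) cl.toList ("", 0, 0, [])).2.1,
         (pvSel4 (pvCenter cl wl) cl.toList ("", 0, 0, [])).2.2.1,
         (pvSel4 (pvCenter cl wl) cl.toList ("", 0, 0, [])).2.2.2) := rfl
  rw [hx, h1, h2, h4]
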